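-- pv_equiv track=rewrite | github.com/FanchenBao/leetcode | Contest_283/LeetCode_ 2195.py | minimalKSum
-- ===== SOURCE A (Python) =====
-- from typing import List
--
-- def minimalKSum(nums: List[int], k: int) -> int:
--     nums = sorted(set(nums))
--     res, pre = 0, 0
--     for n in nums:
--         inbetween = n - pre - 1
--         if inbetween <= k:
--             res += (n - 1 + pre + 1) * inbetween // 2
--             k -= inbetween
--             pre = n
--         else:
--             res += (pre + 1 + pre + k) * k // 2
--             k = 0
--             break
--     if k:
--         res += (nums[-1] + 1 + nums[-1] + k) * k // 2
--     return res
-- ===== SOURCE B (Python) =====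
-- from typing import List
--
-- def minimalKSum(nums: List[int], k: int) -> int:
--     # Running-window reformulation: start from the sum of 1..k, then for each
--     # distinct value n <= k in increasing order, swap n out for the next
--     # integer past the current window end and grow the window.
--     res = k * (k + 1) // 2
--     for n in sorted(set(nums)):
--         if n <= k:
--             res += (k + 1) - n
--             k += 1
--     return res
-- ===== Notes on version B (the rewrite author's own statement) =====
-- stated objective: simpler
-- what changed: B starts from the closed-form sum k*(k+1)//2 and maintains a single running total with a growing window boundary (res += (k+1)-n; k += 1 per colliding value), instead of A's gap-by-gap arithmetic-series summation with a break and a separate tail term indexed by nums[-1].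
import Mathlib
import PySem

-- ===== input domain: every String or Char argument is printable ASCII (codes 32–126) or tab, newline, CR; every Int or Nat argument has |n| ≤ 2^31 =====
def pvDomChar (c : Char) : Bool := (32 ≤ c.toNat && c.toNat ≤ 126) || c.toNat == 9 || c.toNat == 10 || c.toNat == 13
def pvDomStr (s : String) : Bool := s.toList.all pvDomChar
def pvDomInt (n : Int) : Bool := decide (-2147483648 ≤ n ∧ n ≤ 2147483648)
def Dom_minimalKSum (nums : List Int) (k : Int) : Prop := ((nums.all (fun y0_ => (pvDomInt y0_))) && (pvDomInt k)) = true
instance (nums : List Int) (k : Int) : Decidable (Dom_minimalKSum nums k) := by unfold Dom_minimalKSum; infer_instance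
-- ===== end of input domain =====

-- B replaces A's gap-by-gap arithmetic-series summation (with break and nums[-1] tail term)
-- by a closed-form start k*(k+1)//2 plus a running window update per colliding value (simpler).

-- ===== PORT A =====
-- the for-loop of A: state (res, k, pre); returns (res, k) (k = 0 when the loop broke)
def minimalKSumLoop : List Int → Int → Int → Int → Int × Int
  | [], res, k, _pre => (res, k)
  | n :: t, res, k, pre =>
    let inbetween := n - pre - 1
    if inbetween ≤ k then
      minimalKSumLoop t (res + PySem.Int.floordiv ((n - 1 + pre + 1) * inbetween) 2) (k - inbetween) n
    else
      (res + PySem.Int.floordiv ((pre + 1 + pre + k) * k) 2, 0)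

def minimalKSum (nums : List Int) (k : Int) : Int :=
  let nums' := PySem.List.sorted (PySem.Set.ofList nums) (fun x => x) false
  let p := minimalKSumLoop nums' 0 k 0
  -- nums'[-1]: pyGet? = none is Python's IndexError, excluded by Pre_; .getD 0 there is never used under Pre_
  let last := (PySem.List.pyGet? nums' (-1)).getD 0
  if p.2 ≠ 0 then p.1 + PySem.Int.floordiv ((last + 1 + last + p.2) * p.2) 2 else p.1

-- ===== PORT B =====
-- the loop body of B: state (res, k)
def minimalKSumStep (p : Int × Int) (n : Int) : Int × Int :=
  if n ≤ p.2 then (p.1 + (p.2 + 1) - n, p.2 + 1) else p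

def minimalKSum_alt (nums : List Int) (k : Int) : Int :=
  ((PySem.List.sorted (PySem.Set.ofList nums) (fun x => x) false).foldl
    minimalKSumStep (PySem.Int.floordiv (k * (k + 1)) 2, k)).1

-- ===== PRECONDITION & SPEC =====
-- Pre_ excludes exactly the inputs where Python A raises IndexError: empty nums with k ≠ 0 (A reads nums[-1]).
def Pre_minimalKSum (nums : List Int) (k : Int) : Prop := nums = [] → k = 0
instance (nums : List Int) (k : Int) : Decidable (Pre_minimalKSum nums k) := by unfold Pre_minimalKSum; infer_instance
def pvWitness_minimalKSum : List Int × Int := ([1, 2], 3)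

def Spec_minimalKSum (nums : List Int) (k : Int) (out : Int) : Prop := out = minimalKSum_alt nums k
instance (nums : List Int) (k : Int) (out : Int) : Decidable (Spec_minimalKSum nums k out) := by unfold Spec_minimalKSum; infer_instance

-- ===== CLAIM (what is proved, stated in full; the proofs are below) =====
def Claim_equal_minimalKSum : Prop := ∀ (nums : List Int) (k : Int), Dom_minimalKSum nums k → Pre_minimalKSum nums k → Spec_minimalKSum nums k (minimalKSum nums k)

-- ===== LEMMAS AND PROOFS =====

-- triangular number tri x = x*(x+1)//2, the common currency of both programs
def tri (x : Int) : Int := PySem.Int.floordiv (x * (x + 1)) 2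

theorem fd_double (a : Int) : PySem.Int.floordiv (a + a) 2 = a := by
  rw [PySem.Int.floordiv_eq_ediv_of_pos (by norm_num)]; omega

theorem tri_succ (x : Int) : tri (x + 1) = tri x + (x + 1) := by
  obtain ⟨e, he⟩ := Int.even_mul_succ_self x
  have h1 : x * (x + 1) = e + e := he
  have h2 : (x + 1) * ((x + 1) + 1) = (e + x + 1) + (e + x + 1) := by linear_combination h1
  unfold tri
  rw [h1, h2, fd_double, fd_double]
  ring

theorem fd_gap (n pre : Int) :
    PySem.Int.floordiv ((n - 1 + pre + 1) * (n - pre - 1)) 2 = tri (n - 1) - tri pre := by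
  obtain ⟨a, ha⟩ := Int.even_mul_succ_self (n - 1)
  obtain ⟨b, hb⟩ := Int.even_mul_succ_self pre
  have ha' : (n - 1) * ((n - 1) + 1) = a + a := ha
  have hb' : pre * (pre + 1) = b + b := hb
  have h : (n - 1 + pre + 1) * (n - pre - 1) = (a - b) + (a - b) := by linear_combination ha' - hb'
  unfold tri
  rw [h, ha', hb', fd_double, fd_double, fd_double]

theorem fd_run (pre k : Int) :
    PySem.Int.floordiv ((pre + 1 + pre + k) * k) 2 = tri (pre + k) - tri pre := by
  obtain ⟨a, ha⟩ := Int.even_mul_succ_self (pre + k)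
  obtain ⟨b, hb⟩ := Int.even_mul_succ_self pre
  have ha' : (pre + k) * ((pre + k) + 1) = a + a := ha
  have hb' : pre * (pre + 1) = b + b := hb
  have h : (pre + 1 + pre + k) * k = (a - b) + (a - b) := by linear_combination ha' - hb'
  unfold tri
  rw [h, ha', hb', fd_double, fd_double, fd_double]

theorem fd_zero : PySem.Int.floordiv 0 2 = 0 := by decide

-- B's fold skips a list whose elements all exceed the current k
theorem skipB : ∀ (t : List Int) (res k : Int), (∀ n ∈ t, k < n) →
    t.foldl minimalKSumStep (res, k) = (res, k) := by
  intro t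
  induction t with
  | nil => intro res k _; rfl
  | cons n t ih =>
    intro res k h
    have hn : ¬ n ≤ k := by have := h n (by simp); omega
    simp only [List.foldl_cons, minimalKSumStep, if_neg hn]
    exact ih res k (fun m hm => h m (by simp [hm]))

-- A's loop with k = 0 over a strictly increasing list above pre changes nothing
theorem zeroA : ∀ (t : List Int), t.Pairwise (· < ·) → ∀ (res pre : Int), (∀ n ∈ t, pre < n) →
    minimalKSumLoop t res 0 pre = (res, 0) := by
  intro t
  induction t with
  | nil => intro _ res pre _; rfl
  | cons n t ih =>
    intro hp res pre h
    have hpre : pre < n := h n (by simp)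
    simp only [minimalKSumLoop]
    by_cases hle : n - pre - 1 ≤ (0 : Int)
    · have hz : n - pre - 1 = 0 := by omega
      rw [if_pos hle, hz, mul_zero, fd_zero, add_zero, sub_zero]
      rw [List.pairwise_cons] at hp
      exact ih hp.2 res n (fun m hm => hp.1 m hm)
    · rw [if_neg hle]
      have : (pre + 1 + pre + 0) * 0 = 0 := by ring
      rw [this, fd_zero, add_zero]

-- the finish of A: loop result plus the tail term keyed by the last consumed element
def aFin (t : List Int) (res k pre : Int) : Int :=
  let p := minimalKSumLoop t res k pre
  if p.2 ≠ 0 then p.1 + PySem.Int.floordiv ((t.getLastD pre + 1 + t.getLastD pre + p.2) * p.2) 2 else p.1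

-- main invariant: A's remaining work equals B's fold from (res + tri (pre+k) - tri pre, pre+k)
theorem mainInv : ∀ (t : List Int), t.Pairwise (· < ·) → ∀ (res k pre : Int),
    aFin t res k pre = (t.foldl minimalKSumStep (res + tri (pre + k) - tri pre, pre + k)).1 := by
  intro t
  induction t with
  | nil =>
    intro _ res k pre
    unfold aFin minimalKSumLoop
    simp only [List.foldl_nil, List.getLastD_nil]
    by_cases hk : k = 0
    · subst hk; simp
    · rw [if_pos (by simpa using hk), fd_run]
      ring
  | cons n t ih =>
    intro hp res k pre
    rw [List.pairwise_cons] at hp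
    have hfold : (n :: t).foldl minimalKSumStep (res + tri (pre + k) - tri pre, pre + k)
        = t.foldl minimalKSumStep (minimalKSumStep (res + tri (pre + k) - tri pre, pre + k) n) := rfl
    by_cases h1 : n - pre - 1 ≤ k
    · by_cases h2 : n ≤ pre + k
      · -- both take their branch
        have hA : aFin (n :: t) res k pre
            = aFin t (res + PySem.Int.floordiv ((n - 1 + pre + 1) * (n - pre - 1)) 2) (k - (n - pre - 1)) n := by
          unfold aFin
          simp only [minimalKSumLoop, if_pos h1, List.getLastD_cons]
        rw [hA, ih hp.2, hfold]
        simp only [minimalKSumStep, if_pos h2]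
        congr 2
        rw [fd_gap]
        have e1 : n + (k - (n - pre - 1)) = (pre + k) + 1 := by ring
        rw [e1, tri_succ]
        have e2 : tri n = tri (n - 1) + n := by
          have := tri_succ (n - 1); simpa using this
        rw [e2]; ring_nf
      · -- A consumes n with inbetween = k, reaching k = 0; B skips everything
        have hn : n = pre + k + 1 := by omega
        have hA : aFin (n :: t) res k pre
            = aFin t (res + PySem.Int.floordiv ((n - 1 + pre + 1) * (n - pre - 1)) 2) (k - (n - pre - 1)) n := by
          unfold aFin
          simp only [minimalKSumLoop, if_pos h1, List.getLastD_cons]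
        have hk0 : k - (n - pre - 1) = 0 := by omega
        rw [hA, hk0]
        unfold aFin
        rw [zeroA t hp.2 _ n hp.1]
        rw [if_neg (by simp)]
        rw [hfold]
        simp only [minimalKSumStep, if_neg h2]
        rw [skipB t _ _ (fun m hm => by have := hp.1 m hm; omega)]
        rw [fd_gap]
        have hn1 : n - 1 = pre + k := by omega
        rw [hn1]
        show res + (tri (pre + k) - tri pre) = res + tri (pre + k) - tri pre
        ring
    · -- A breaks; B skips everything
      have hA : aFin (n :: t) res k pre = res + PySem.Int.floordiv ((pre + 1 + pre + k) * k) 2 := by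
        unfold aFin
        simp only [minimalKSumLoop, if_neg h1]
        simp
      rw [hA, hfold]
      have hn2 : ¬ n ≤ pre + k := by omega
      simp only [minimalKSumStep, if_neg hn2]
      rw [skipB t _ _ (fun m hm => by have := hp.1 m hm; omega)]
      rw [fd_run]
      show res + (tri (pre + k) - tri pre) = res + tri (pre + k) - tri pre
      ring

theorem tri_zero : tri 0 = 0 := by decide

-- ===== VERDICT (by name: the statement is the Claim_ definition above) =====
theorem minimalKSum_spec : Claim_equal_minimalKSum := by
  unfold Claim_equal_minimalKSum Spec_minimalKSum
  intro nums k _ _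
  unfold minimalKSum minimalKSum_alt
  set L := PySem.List.sorted (PySem.Set.ofList nums) (fun x => x) false with hL
  have hpw : L.Pairwise (· < ·) := by
    rw [hL]; exact PySem.List.sorted_ofList_pairwise_lt nums
  have hlast : (PySem.List.pyGet? L (-1)).getD 0 = L.getLastD 0 := by
    rw [PySem.List.pyGet?_neg_one, List.getLastD_eq_getLast?]
  simp only [hlast]
  have := mainInv L hpw 0 k 0
  unfold aFin at this
  simp only at this
  rw [this]
  congr 2
  have : PySem.Int.floordiv (k * (k + 1)) 2 = tri k := rfl
  rw [this, tri_zero]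
  ring_nf
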